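-- pv_equiv track=rewrite | github.com/rawhack3r/ReconTool | Deep_Seek/nightowl4/core/analyzer.py | analyze_vulnerabilities
-- ===== SOURCE A (Python) =====
-- def analyze_vulnerabilities(vulns):
--     critical = []
--     high = []
--     medium = []
--     low = []
--
--     for tool, findings in vulns.items():
--         for finding in findings:
--             if "[CRITICAL]" in finding or "Critical" in finding:
--                 critical.append(f"{tool}: {finding}")
--             elif "[HIGH]" in finding or "High" in finding:
--                 high.append(f"{tool}: {finding}")
--             elif "[MEDIUM]" in finding or "Medium" in finding:
--                 medium.append(f"{tool}: {finding}")
--             else: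
--                 low.append(f"{tool}: {finding}")
--
--     return {
--         "critical": critical,
--         "high": high,
--         "medium": medium,
--         "low": low
--     }
-- ===== SOURCE B (Python) =====
-- PRIORITIES = [
--     (("[CRITICAL]", "Critical"), "critical"),
--     (("[HIGH]", "High"), "high"),
--     (("[MEDIUM]", "Medium"), "medium"),
-- ]
--
--
-- def analyze_vulnerabilities(vulns):
--     def severity(finding):
--         for keywords, level in PRIORITIES:
--             if any(k in finding for k in keywords):
--                 return level
--         return "low"
--
--     tagged = [(severity(f), f"{t}: {f}") for t, fs in vulns.items() for f in fs]
--     return {lvl: [msg for sev, msg in tagged if sev == lvl]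
--             for lvl in ("critical", "high", "medium", "low")}
-- ===== Notes on version B (the rewrite author's own statement) =====
-- stated objective: alternative
-- what changed: Replaces the four mutable accumulator lists and the elif chain by a data-driven design: a priority keyword table drives a severity classifier, all findings are tagged in one flat comprehension, and each bucket is then obtained by filtering the tagged list.
import Mathlib
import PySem

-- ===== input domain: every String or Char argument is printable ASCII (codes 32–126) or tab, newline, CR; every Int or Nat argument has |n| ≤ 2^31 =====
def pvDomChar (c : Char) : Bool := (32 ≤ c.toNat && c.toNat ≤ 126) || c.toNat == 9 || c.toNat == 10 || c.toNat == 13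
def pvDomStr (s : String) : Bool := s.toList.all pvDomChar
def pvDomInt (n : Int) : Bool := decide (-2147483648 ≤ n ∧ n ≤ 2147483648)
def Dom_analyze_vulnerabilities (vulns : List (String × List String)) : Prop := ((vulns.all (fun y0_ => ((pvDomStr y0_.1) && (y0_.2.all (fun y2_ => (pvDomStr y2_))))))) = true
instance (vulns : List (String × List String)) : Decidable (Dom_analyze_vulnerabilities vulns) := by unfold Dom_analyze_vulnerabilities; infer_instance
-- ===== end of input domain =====

-- B replaces A's four accumulator lists and elif chain by a keyword-priority table, a
-- severity classifier, one flat tagging pass, and a filter per bucket (objective: alternative).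

-- ===== PORT A =====
-- f"{tool}: {finding}"
def pvFmt (tool finding : String) : String := tool ++ ": " ++ finding

-- state (critical, high, medium, low); the nested for-loops are two folds over that state
def pvAStep (tool : String) (acc : List String × List String × List String × List String)
    (finding : String) : List String × List String × List String × List String :=
  if PySem.Str.isIn "[CRITICAL]" finding || PySem.Str.isIn "Critical" finding then
    (acc.1 ++ [pvFmt tool finding], acc.2.1, acc.2.2.1, acc.2.2.2)
  else if PySem.Str.isIn "[HIGH]" finding || PySem.Str.isIn "High" finding then
    (acc.1, acc.2.1 ++ [pvFmt tool finding], acc.2.2.1, acc.2.2.2)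
  else if PySem.Str.isIn "[MEDIUM]" finding || PySem.Str.isIn "Medium" finding then
    (acc.1, acc.2.1, acc.2.2.1 ++ [pvFmt tool finding], acc.2.2.2)
  else
    (acc.1, acc.2.1, acc.2.2.1, acc.2.2.2 ++ [pvFmt tool finding])

def analyze_vulnerabilities (vulns : List (String × List String)) : List (String × List String) :=
  let r := vulns.foldl (fun acc tf => tf.2.foldl (pvAStep tf.1) acc) ([], [], [], [])
  [("critical", r.1), ("high", r.2.1), ("medium", r.2.2.1), ("low", r.2.2.2)]

-- ===== PORT B =====
def pvPriorities : List (List String × String) :=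
  [(["[CRITICAL]", "Critical"], "critical"),
   (["[HIGH]", "High"], "high"),
   (["[MEDIUM]", "Medium"], "medium")]

-- 'for keywords, level in PRIORITIES: if any(...): return level / return "low"'
def pvSeverity (table : List (List String × String)) (finding : String) : String :=
  match table with
  | [] => "low"
  | (keywords, level) :: rest =>
    if keywords.any (fun k => PySem.Str.isIn k finding) then level
    else pvSeverity rest finding

def pvTagged (vulns : List (String × List String)) : List (String × String) :=
  vulns.flatMap (fun tf => tf.2.map (fun f => (pvSeverity pvPriorities f, tf.1 ++ ": " ++ f)))

def analyze_vulnerabilities_alt (vulns : List (String × List String)) : List (String × List String) :=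
  let tagged := pvTagged vulns
  ["critical", "high", "medium", "low"].map
    (fun lvl => (lvl, (tagged.filter (fun sm => sm.1 == lvl)).map (·.2)))

-- ===== PRECONDITION & SPEC =====
def Spec_analyze_vulnerabilities (vulns : List (String × List String)) (out : List (String × List String)) : Prop := out = analyze_vulnerabilities_alt vulns
instance (vulns : List (String × List String)) (out : List (String × List String)) : Decidable (Spec_analyze_vulnerabilities vulns out) := by unfold Spec_analyze_vulnerabilities; infer_instance

-- ===== CLAIM (what is proved, stated in full; the proofs are below) =====
def Claim_equal_analyze_vulnerabilities : Prop := ∀ (vulns : List (String × List String)), Dom_analyze_vulnerabilities vulns → Spec_analyze_vulnerabilities vulns (analyze_vulnerabilities vulns)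

-- ===== LEMMAS AND PROOFS =====
-- the bucket that B's filter extracts from the tagged list of the part processed so far
def pvSel (lvl : String) (tagged : List (String × String)) : List String :=
  (tagged.filter (fun sm => sm.1 == lvl)).map (·.2)

theorem pvSel_append (lvl : String) (xs ys : List (String × String)) :
    pvSel lvl (xs ++ ys) = pvSel lvl xs ++ pvSel lvl ys := by
  simp [pvSel]

-- per-finding classification: B's table scan agrees with A's elif chain
theorem pvSev_crit (f : String)
    (h : (PySem.Str.isIn "[CRITICAL]" f || PySem.Str.isIn "Critical" f) = true) :
    pvSeverity pvPriorities f = "critical" := by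
  simp only [pvSeverity, pvPriorities, List.any_cons, List.any_nil, Bool.or_false, h, if_true]

theorem pvSev_high (f : String)
    (h1 : (PySem.Str.isIn "[CRITICAL]" f || PySem.Str.isIn "Critical" f) = false)
    (h2 : (PySem.Str.isIn "[HIGH]" f || PySem.Str.isIn "High" f) = true) :
    pvSeverity pvPriorities f = "high" := by
  simp only [pvSeverity, pvPriorities, List.any_cons, List.any_nil, Bool.or_false, h1, h2,
    Bool.false_eq_true, if_false, if_true]

theorem pvSev_med (f : String)
    (h1 : (PySem.Str.isIn "[CRITICAL]" f || PySem.Str.isIn "Critical" f) = false)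
    (h2 : (PySem.Str.isIn "[HIGH]" f || PySem.Str.isIn "High" f) = false)
    (h3 : (PySem.Str.isIn "[MEDIUM]" f || PySem.Str.isIn "Medium" f) = true) :
    pvSeverity pvPriorities f = "medium" := by
  simp only [pvSeverity, pvPriorities, List.any_cons, List.any_nil, Bool.or_false, h1, h2, h3,
    Bool.false_eq_true, if_false, if_true]

theorem pvSev_low (f : String)
    (h1 : (PySem.Str.isIn "[CRITICAL]" f || PySem.Str.isIn "Critical" f) = false)
    (h2 : (PySem.Str.isIn "[HIGH]" f || PySem.Str.isIn "High" f) = false)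
    (h3 : (PySem.Str.isIn "[MEDIUM]" f || PySem.Str.isIn "Medium" f) = false) :
    pvSeverity pvPriorities f = "low" := by
  simp only [pvSeverity, pvPriorities, List.any_cons, List.any_nil, Bool.or_false, h1, h2, h3,
    Bool.false_eq_true, if_false]

-- one bucket-filter step of B on a freshly tagged finding
theorem pvSel_cons (lvl sev msg : String) (t : List (String × String)) :
    pvSel lvl ((sev, msg) :: t) = (if sev == lvl then [msg] else []) ++ pvSel lvl t := by
  by_cases h : sev == lvl <;> simp [pvSel, h]

-- the inner loop over one tool's findings, related to B's tagging of those findings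
theorem pvInner (tool : String) (fs : List String)
    (c h m l : List String) :
    fs.foldl (pvAStep tool) (c, h, m, l) =
      (c ++ pvSel "critical" (fs.map (fun f => (pvSeverity pvPriorities f, tool ++ ": " ++ f))),
       h ++ pvSel "high" (fs.map (fun f => (pvSeverity pvPriorities f, tool ++ ": " ++ f))),
       m ++ pvSel "medium" (fs.map (fun f => (pvSeverity pvPriorities f, tool ++ ": " ++ f))),
       l ++ pvSel "low" (fs.map (fun f => (pvSeverity pvPriorities f, tool ++ ": " ++ f)))) := by
  induction fs generalizing c h m l with
  | nil => simp [pvSel]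
  | cons f fs ih =>
    simp only [List.foldl_cons, List.map_cons]
    by_cases h1 : (PySem.Str.isIn "[CRITICAL]" f || PySem.Str.isIn "Critical" f) = true
    · rw [pvSev_crit f h1]
      simp only [pvAStep, h1, if_true, ih, pvSel_cons, pvFmt]
      simp [List.append_assoc]
    · rw [Bool.not_eq_true] at h1
      by_cases h2 : (PySem.Str.isIn "[HIGH]" f || PySem.Str.isIn "High" f) = true
      · rw [pvSev_high f h1 h2]
        simp only [pvAStep, h1, h2, Bool.false_eq_true, if_false, if_true, ih, pvSel_cons, pvFmt]
        simp [List.append_assoc]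
      · rw [Bool.not_eq_true] at h2
        by_cases h3 : (PySem.Str.isIn "[MEDIUM]" f || PySem.Str.isIn "Medium" f) = true
        · rw [pvSev_med f h1 h2 h3]
          simp only [pvAStep, h1, h2, h3, Bool.false_eq_true, if_false, if_true, ih, pvSel_cons,
            pvFmt]
          simp [List.append_assoc]
        · rw [Bool.not_eq_true] at h3
          rw [pvSev_low f h1 h2 h3]
          simp only [pvAStep, h1, h2, h3, Bool.false_eq_true, if_false, ih, pvSel_cons, pvFmt]
          simp [List.append_assoc]

theorem pvOuter (vulns : List (String × List String)) (c h m l : List String) :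
    vulns.foldl (fun acc tf => tf.2.foldl (pvAStep tf.1) acc) (c, h, m, l) =
      (c ++ pvSel "critical" (pvTagged vulns), h ++ pvSel "high" (pvTagged vulns),
       m ++ pvSel "medium" (pvTagged vulns), l ++ pvSel "low" (pvTagged vulns)) := by
  induction vulns generalizing c h m l with
  | nil => simp [pvTagged, pvSel]
  | cons tf rest ih =>
    simp only [List.foldl_cons, pvInner, ih, pvTagged, List.flatMap_cons, pvSel_append]
    simp [List.append_assoc]

-- ===== VERDICT (by name: the statement is the Claim_ definition above) =====
theorem analyze_vulnerabilities_spec : Claim_equal_analyze_vulnerabilities := by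
  intro vulns _
  show analyze_vulnerabilities vulns = analyze_vulnerabilities_alt vulns
  simp [analyze_vulnerabilities, analyze_vulnerabilities_alt, pvOuter, pvSel]
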